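-- pv_equiv track=rewrite | github.com/zhpn1024/ribotish | src/zbio/ribo.py | getTIS
-- ===== SOURCE A (Python) =====
-- defOffset = 12
--
-- def getTIS(arr, dis = [-40,20], defOffset = defOffset) :
--   '''get position of max count for TIS data
--   '''
--   m = max(arr)
--   mis = [ i + dis[0] for i, n in enumerate(arr) if n == m]
--   md, mp = 40, -defOffset
--   for i in mis :
--     if abs(i + defOffset) < md :
--       md, mp = abs(i + defOffset), i
--   return mp
-- ===== SOURCE B (Python) =====
-- defOffset = 12
--
-- def getTIS(arr, dis = [-40,20], defOffset = defOffset):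
--   '''get position of max count for TIS data
--
--   Single forward pass: track the running maximum and, fused with it, the
--   best (closest-to--defOffset) candidate position among the current maxima;
--   a new maximum resets the candidate state.
--   '''
--   curmax = None
--   md, mp = 40, -defOffset
--   for idx, n in enumerate(arr):
--     if curmax is None or n > curmax:
--       curmax = n
--       md, mp = 40, -defOffset
--       c = idx + dis[0]
--       if abs(c + defOffset) < md:
--         md, mp = abs(c + defOffset), c
--     elif n == curmax:
--       c = idx + dis[0]
--       if abs(c + defOffset) < md:
--         md, mp = abs(c + defOffset), c
--   return mp
-- ===== Notes on version B (the rewrite author's own statement) =====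
-- stated objective: alternative
-- what changed: B replaces A's three passes (max(arr), a comprehension collecting all max positions, then a closest-to--defOffset scan over them) with a single fused forward pass that tracks the running maximum and resets the best-candidate state whenever a new maximum appears (no intermediate candidate list).
-- crash fix: On empty arr A raises ValueError (max of an empty sequence); B returns -defOffset (the same default A's scan starts from); A also raises IndexError on empty dis, where B raises too unless arr is empty. — e.g. on getTIS([], [-40, 20], 12): A raises ValueError, B returns -12
import Mathlib
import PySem

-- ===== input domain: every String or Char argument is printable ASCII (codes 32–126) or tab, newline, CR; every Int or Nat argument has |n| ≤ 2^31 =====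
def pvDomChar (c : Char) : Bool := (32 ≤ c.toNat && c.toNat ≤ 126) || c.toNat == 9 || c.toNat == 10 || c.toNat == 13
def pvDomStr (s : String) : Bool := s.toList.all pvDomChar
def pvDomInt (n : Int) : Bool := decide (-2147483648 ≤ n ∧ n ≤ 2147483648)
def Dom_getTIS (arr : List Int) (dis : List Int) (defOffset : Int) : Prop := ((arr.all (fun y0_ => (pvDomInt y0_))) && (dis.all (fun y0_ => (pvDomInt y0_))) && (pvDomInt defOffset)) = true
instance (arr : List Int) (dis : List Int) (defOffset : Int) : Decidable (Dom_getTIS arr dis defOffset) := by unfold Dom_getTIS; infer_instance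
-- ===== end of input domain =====

-- B fuses A's two passes (max-finding, then closest-candidate scan) into one
-- forward pass whose candidate state resets whenever a new maximum appears;
-- objective: alternative (single fused pass over the array).

-- ===== PORT A =====
-- the closest-candidate update of A's for-loop body
def stepA (dO : Int) (s : Int × Int) (i : Int) : Int × Int :=
  if |i + dO| < s.1 then (|i + dO|, i) else s

-- A's list comprehension: positions (shifted by dis[0]) whose count equals m
def misA (arr : List Int) (d0 m : Int) : List Int :=
  ((PySem.List.enumerate arr).filter (fun p => p.2 == m)).map (fun p => p.1 + d0)

def getTIS (arr : List Int) (dis : List Int) (defOffset : Int) : Int :=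
  -- max(arr) raises on empty arr, dis[0] on empty dis: both excluded by Pre_getTIS
  match PySem.List.max? arr (fun x => x), PySem.List.pyGet? dis 0 with
  | some m, some d0 =>
      let mis := misA arr d0 m
      (mis.foldl (stepA defOffset) (40, -defOffset)).2
  | _, _ => 0

-- ===== PORT B =====
-- B's loop body: state = (current max so far, best distance, best position)
def stepB (d0 dO : Int) (s : Option Int × Int × Int) (p : Int × Int) : Option Int × Int × Int :=
  let c := p.1 + d0
  match s with
  | (none, _, _) =>
      (some p.2, if |c + dO| < 40 then (|c + dO|, c) else (40, -dO))
  | (some v, md, mp) =>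
      if v < p.2 then
        (some p.2, if |c + dO| < 40 then (|c + dO|, c) else (40, -dO))
      else if p.2 == v then
        (some v, if |c + dO| < md then (|c + dO|, c) else (md, mp))
      else (some v, md, mp)

def getTIS_alt (arr : List Int) (dis : List Int) (defOffset : Int) : Int :=
  -- B reads dis[0] only inside the loop; on Pre_ (dis ≠ []) getD is exact
  let d0 := (PySem.List.pyGet? dis 0).getD 0
  ((PySem.List.enumerate arr).foldl (stepB d0 defOffset) (none, 40, -defOffset)).2.2

-- ===== PRECONDITION & SPEC =====
-- A raises ValueError on empty arr (max of empty) and IndexError on empty dis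
def Pre_getTIS (arr : List Int) (dis : List Int) (defOffset : Int) : Prop :=
  arr ≠ [] ∧ dis ≠ []
instance (arr : List Int) (dis : List Int) (defOffset : Int) : Decidable (Pre_getTIS arr dis defOffset) := by unfold Pre_getTIS; infer_instance
def pvWitness_getTIS : List Int × List Int × Int := ([3, 5, 5, 1], [-40, 20], 12)

-- On empty arr A raises ValueError (max of empty sequence); B returns -defOffset.
def Raises_getTIS (arr : List Int) (dis : List Int) (defOffset : Int) : Prop := arr = []
instance (arr : List Int) (dis : List Int) (defOffset : Int) : Decidable (Raises_getTIS arr dis defOffset) := by unfold Raises_getTIS; infer_instance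
def pvRaiseWitness_getTIS : List Int × List Int × Int := ([], [-40, 20], 12)
def pvRaiseWitnessOut_getTIS : Int := -12

def Spec_getTIS (arr : List Int) (dis : List Int) (defOffset : Int) (out : Int) : Prop := out = getTIS_alt arr dis defOffset
instance (arr : List Int) (dis : List Int) (defOffset : Int) (out : Int) : Decidable (Spec_getTIS arr dis defOffset out) := by unfold Spec_getTIS; infer_instance

-- ===== CLAIM (what is proved, stated in full; the proofs are below) =====
def Claim_equal_getTIS : Prop := ∀ (arr : List Int) (dis : List Int) (defOffset : Int), Dom_getTIS arr dis defOffset → Pre_getTIS arr dis defOffset → Spec_getTIS arr dis defOffset (getTIS arr dis defOffset)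
def Claim_raises_getTIS : Prop := (∀ (arr : List Int) (dis : List Int) (defOffset : Int), Dom_getTIS arr dis defOffset → Raises_getTIS arr dis defOffset → ¬ Pre_getTIS arr dis defOffset) ∧ (Dom_getTIS (pvRaiseWitness_getTIS.1) (pvRaiseWitness_getTIS.2.1) (pvRaiseWitness_getTIS.2.2) ∧ Raises_getTIS (pvRaiseWitness_getTIS.1) (pvRaiseWitness_getTIS.2.1) (pvRaiseWitness_getTIS.2.2) ∧ getTIS_alt (pvRaiseWitness_getTIS.1) (pvRaiseWitness_getTIS.2.1) (pvRaiseWitness_getTIS.2.2) = pvRaiseWitnessOut_getTIS)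

-- ===== LEMMAS AND PROOFS =====

-- max of a nonempty list as Python's running-max loop
def maxOf (l : List Int) : Int := match l with | [] => 0 | a :: t => t.foldl max a

lemma maxOf_append (a : Int) (t : List Int) (x : Int) :
    maxOf ((a :: t) ++ [x]) = max (maxOf (a :: t)) x := by
  simp [maxOf, List.foldl_append]

lemma le_maxOf (a : Int) (t : List Int) : ∀ y ∈ a :: t, y ≤ maxOf (a :: t) := by
  intro y hy
  rcases List.mem_cons.mp hy with h | h
  · subst h; exact (PySem.List.le_foldl_max t y).1
  · exact (PySem.List.le_foldl_max t a).2 y h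

lemma misA_append (l : List Int) (x d0 m : Int) :
    misA (l ++ [x]) d0 m =
      misA l d0 m ++ (if x == m then [(l.length : Int) + d0] else []) := by
  unfold misA
  rw [PySem.List.enumerate_append]
  by_cases h : x = m
  · subst h; simp [PySem.List.enumerate, List.filter_append]
  · simp [PySem.List.enumerate, List.filter_append, h]

lemma misA_nilOfGt (l : List Int) (x d0 : Int) (h : ∀ y ∈ l, y < x) :
    misA l d0 x = [] := by
  unfold misA
  rw [List.map_eq_nil_iff, List.filter_eq_nil_iff]
  intro p hp
  rcases (PySem.List.mem_enumerate_iff _ _ _).mp hp with ⟨k, hk, rfl⟩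
  simpa using (h _ (List.getElem_mem hk)).ne

-- invariant of B's fused pass: after any nonempty prefix the state is
-- (running max, A's fold over that prefix's candidate list)
lemma fused_eq (d0 dO : Int) : ∀ (l : List Int), l ≠ [] →
    (PySem.List.enumerate l).foldl (stepB d0 dO) (none, 40, -dO)
      = (some (maxOf l), (misA l d0 (maxOf l)).foldl (stepA dO) (40, -dO)) := by
  intro l
  induction l using List.reverseRecOn with
  | nil => intro h; exact absurd rfl h
  | append_singleton l x ih =>
    intro _
    rcases l with _ | ⟨a, t⟩
    · simp [PySem.List.enumerate, stepB, stepA, maxOf, misA]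
    · have hne : (a :: t) ≠ [] := by simp
      have hstep : (PySem.List.enumerate ((a :: t) ++ [x])).foldl (stepB d0 dO) (none, 40, -dO)
          = stepB d0 dO ((PySem.List.enumerate (a :: t)).foldl (stepB d0 dO) (none, 40, -dO))
              (((a :: t).length : Int), x) := by
        rw [PySem.List.enumerate_append]
        simp [PySem.List.enumerate]
      rw [hstep, ih hne, maxOf_append, misA_append]
      set m := maxOf (a :: t) with hm
      rcases lt_trichotomy m x with hlt | heq | hgt
      · -- new maximum: reset
        have hmax : max m x = x := max_eq_right hlt.le
        have hmis : misA (a :: t) d0 x = [] :=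
          misA_nilOfGt _ _ _ (fun y hy => lt_of_le_of_lt (le_maxOf a t y hy) hlt)
        simp [stepB, hlt, hmax, hmis, stepA]
      · -- tie with current maximum: test the new position
        subst heq
        simp [stepB, stepA, List.foldl_append]
      · -- below the maximum: skip
        have hmax : max m x = m := max_eq_left hgt.le
        simp [stepB, not_lt.mpr hgt.le, hgt.ne, hmax]

-- ===== VERDICT (by name: the statement is the Claim_ definition above) =====
theorem getTIS_spec : Claim_equal_getTIS := by
  intro arr dis dO _ hpre
  rcases hpre with ⟨ha, hd⟩
  rcases arr with _ | ⟨a, t⟩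
  · exact absurd rfl ha
  rcases dis with _ | ⟨e, ds⟩
  · exact absurd rfl hd
  have hget : PySem.List.pyGet? (e :: ds) (0 : Int) = some e := by
    simp [PySem.List.pyGet?, PySem.List.pyIdx?]
  unfold Spec_getTIS getTIS getTIS_alt
  simp only [PySem.List.max?_id_cons, hget, Option.getD_some]
  rw [fused_eq e dO (a :: t) (by simp)]
  simp [maxOf]

theorem getTIS_raises : Claim_raises_getTIS := by
  unfold Claim_raises_getTIS
  exact ⟨fun arr dis dO _ hr hp => hp.1 hr, by decide⟩

-- self-check: the raise witness indeed lies inside Raises_getTIS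
theorem pvRaiseWitness_ok : Raises_getTIS (pvRaiseWitness_getTIS.1) (pvRaiseWitness_getTIS.2.1) (pvRaiseWitness_getTIS.2.2) := getTIS_raises.2.2.1
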